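-- pv_equiv track=rewrite | github.com/ilyes-smaouii/advent_of_code_2024 | scripts/day_19.py | count_total_possible_ways
-- ===== SOURCE A (Python) =====
-- def count_possible_ways_efficient_aux(design, patterns, max_pat_len = 8) :
--   patterns = set(patterns) # quicker search than list type
--   count_list = [1]
--   for i in range(1, len(design) + 1) :
--     next_count = 0
--     for j in range(1, 1 + min(i, max_pat_len)) :
--       if design[i-j:i] in patterns :
--         next_count += count_list[i-j]
--     count_list.append(next_count)
--   return count_list
--
-- def count_total_possible_ways(designs, patterns) :
--   max_pat_len = 0
--   for pattern in patterns :
--     max_pat_len = max(max_pat_len, len(pattern))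
--   total_possible_ways = 0
--   for design in designs :
--     total_possible_ways += count_possible_ways_efficient_aux(design, patterns, max_pat_len)[-1]
--   return total_possible_ways
-- ===== SOURCE B (Python) =====
-- def count_total_possible_ways(designs, patterns):
--     # Per design: backward DP gathering directly over the (deduplicated, non-empty)
--     # patterns with a ranged startswith test -- no max-pattern-length bookkeeping,
--     # no slice-into-set membership, no per-design helper list returned.
--     pats = [p for p in set(patterns) if p]
--     total = 0
--     for design in designs:
--         dp = [1]
--         for i in range(1, len(design) + 1):
--             dp.append(sum(dp[i - len(p)] for p in pats
--                           if len(p) <= i and design.startswith(p, i - len(p))))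
--         total += dp[-1]
--     return total
-- ===== Notes on version B (the rewrite author's own statement) =====
-- stated objective: alternative
-- what changed: Replaces A's backward DP that enumerates candidate lengths 1..min(i, max pattern length) and tests design[i-j:i] against a pattern set by a backward DP that gathers directly over the deduplicated non-empty patterns with a positioned startswith test, with no max-pattern-length bookkeeping and no per-design count list returned by a helper.
import Mathlib
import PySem

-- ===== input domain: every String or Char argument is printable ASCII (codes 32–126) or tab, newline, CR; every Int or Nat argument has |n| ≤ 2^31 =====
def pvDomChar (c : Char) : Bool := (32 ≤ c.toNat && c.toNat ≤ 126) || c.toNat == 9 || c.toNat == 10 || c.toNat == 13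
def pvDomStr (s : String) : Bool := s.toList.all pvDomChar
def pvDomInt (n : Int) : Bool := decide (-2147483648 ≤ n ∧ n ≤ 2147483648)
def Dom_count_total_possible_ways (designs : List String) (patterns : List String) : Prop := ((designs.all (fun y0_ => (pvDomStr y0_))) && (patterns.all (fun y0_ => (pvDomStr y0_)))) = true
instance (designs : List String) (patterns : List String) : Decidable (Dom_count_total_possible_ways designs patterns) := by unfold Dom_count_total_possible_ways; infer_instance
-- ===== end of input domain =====

-- B replaces A's length-indexed backward DP (slice design[i-j:i], membership in a pattern set,
-- with a precomputed max pattern length) by a backward DP that gathers directly over the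
-- deduplicated non-empty patterns with a positioned startswith test; same values, no speed claim.

-- ===== PORT A =====
-- Strings are handled as their character lists (String.toList), so slicing and set
-- membership are PySem primitives on List Char.  count_list[i-j] and count_list[-1]
-- are always in range in the Python, so pyGetD with default 0 is exact here.
def count_possible_ways_efficient_aux (design : String) (patterns : List String) (max_pat_len : Int) : List Int :=
  let pset : PySem.Set (List Char) := PySem.Set.ofList (patterns.map String.toList)
  let s := design.toList
  (PySem.List.pyRange 1 ((s.length : Int) + 1)).foldl
    (fun count_list i =>
      let next_count :=
        (PySem.List.pyRange 1 (1 + min i max_pat_len)).foldl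
          (fun acc j =>
            if PySem.List.slice s (some (i - j)) (some i) ∈ pset then
              acc + PySem.List.pyGetD count_list (i - j) 0
            else acc) 0
      count_list ++ [next_count]) [1]

def count_total_possible_ways (designs : List String) (patterns : List String) : Int :=
  let max_pat_len := patterns.foldl (fun m pattern => max m (PySem.Str.len pattern)) 0
  designs.foldl
    (fun total design =>
      total + PySem.List.pyGetD (count_possible_ways_efficient_aux design patterns max_pat_len) (-1) 0) 0

-- ===== PORT B =====
-- [p for p in set(patterns) if p]  (pattern strings as character lists)
def pv_pats (patterns : List String) : List (List Char) :=
  (PySem.Set.ofList (patterns.map String.toList)).filter (fun p => !p.isEmpty)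

-- the dp list one design's loop builds; design.startswith(p, i - len(p)) is ported
-- by hand as PySem.Chars.startswith on the dropped suffix (exact: the start index is ≥ 0 here)
def pv_dp (pats : List (List Char)) (s : List Char) : List Int :=
  (PySem.List.pyRange 1 ((s.length : Int) + 1)).foldl
    (fun dp i =>
      dp ++ [(pats.map (fun p =>
        if (p.length : Int) ≤ i ∧
            PySem.Chars.startswith (s.drop (i - (p.length : Int)).toNat) p = true then
          PySem.List.pyGetD dp (i - (p.length : Int)) 0
        else 0)).sum]) [1]

def count_total_possible_ways_alt (designs : List String) (patterns : List String) : Int :=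
  let pats := pv_pats patterns
  designs.foldl
    (fun total design => total + PySem.List.pyGetD (pv_dp pats design.toList) (-1) 0) 0

-- ===== PRECONDITION & SPEC =====
def Spec_count_total_possible_ways (designs : List String) (patterns : List String) (out : Int) : Prop := out = count_total_possible_ways_alt designs patterns
instance (designs : List String) (patterns : List String) (out : Int) : Decidable (Spec_count_total_possible_ways designs patterns out) := by unfold Spec_count_total_possible_ways; infer_instance

-- ===== CLAIM (what is proved, stated in full; the proofs are below) =====
def Claim_equal_count_total_possible_ways : Prop := ∀ (designs : List String) (patterns : List String), Dom_count_total_possible_ways designs patterns → Spec_count_total_possible_ways designs patterns (count_total_possible_ways designs patterns)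

-- ===== LEMMAS AND PROOFS =====

theorem nodup_pyRange_one (a b : Int) : (PySem.List.pyRange a b).Nodup := by
  rw [PySem.List.pyRange_of_pos a b one_pos]
  refine List.Nodup.map ?_ List.nodup_range
  intro x y h
  dsimp at h
  omega

theorem slice_take_drop (s : List Char) {i j : Int} (h1 : 1 ≤ j) (h2 : j ≤ i)
    (_h3 : i ≤ (s.length : Int)) :
    PySem.List.slice s (some (i - j)) (some i) = (s.drop (i - j).toNat).take j.toNat := by
  have ha : (((i - j).toNat : Int)) = i - j := Int.toNat_of_nonneg (by omega)
  have hb : ((i.toNat : Int)) = i := Int.toNat_of_nonneg (by omega)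
  rw [← ha, ← hb, PySem.List.slice_natCast]
  congr 1
  omega

theorem slice_length (s : List Char) {i j : Int} (h1 : 1 ≤ j) (h2 : j ≤ i)
    (_h3 : i ≤ (s.length : Int)) :
    (PySem.List.slice s (some (i - j)) (some i)).length = j.toNat := by
  rw [slice_take_drop s h1 h2 _h3]
  simp only [List.length_take, List.length_drop]
  omega

-- Adding one fresh pattern p to the candidate set adds exactly its (unique possible)
-- contribution at j = |p| to the length-indexed sum.
theorem sum_insert_head (s : List Char) (i : Int) (dp : List Int) (p : List Char)
    (L : List (List Char)) (hi : i ≤ (s.length : Int)) (hpL : p ∉ L) :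
    ∀ J : List Int, J.Nodup → (∀ j ∈ J, 1 ≤ j ∧ j ≤ i) →
    ((J.map (fun j => if PySem.List.slice s (some (i - j)) (some i) ∈ (p :: L) then PySem.List.pyGetD dp (i - j) 0 else 0)).sum
      = (J.map (fun j => if PySem.List.slice s (some (i - j)) (some i) ∈ L then PySem.List.pyGetD dp (i - j) 0 else 0)).sum
        + (if (p.length : Int) ∈ J ∧ PySem.List.slice s (some (i - (p.length : Int))) (some i) = p then PySem.List.pyGetD dp (i - (p.length : Int)) 0 else 0)) := by
  intro J
  induction J with
  | nil => simp
  | cons j J ih =>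
    intro hnd hJ
    have hj := hJ j (List.mem_cons_self ..)
    have hnd' := (List.nodup_cons.mp hnd).2
    have hIH := ih hnd' (fun x hx => hJ x (List.mem_cons_of_mem _ hx))
    simp only [List.map_cons, List.sum_cons]
    by_cases hsp : PySem.List.slice s (some (i - j)) (some i) = p
    · have hlen : j = (p.length : Int) := by
        have hl := slice_length s hj.1 hj.2 hi
        rw [hsp] at hl
        omega
      have hnotJ : (p.length : Int) ∉ J := hlen ▸ (List.nodup_cons.mp hnd).1
      have hm1 : PySem.List.slice s (some (i - j)) (some i) ∈ (p :: L) := by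
        rw [hsp]; exact List.mem_cons_self ..
      have hm2 : PySem.List.slice s (some (i - j)) (some i) ∉ L := by
        rw [hsp]; exact hpL
      have hind1 : ¬((p.length : Int) ∈ J ∧ PySem.List.slice s (some (i - (p.length : Int))) (some i) = p) :=
        fun hc => hnotJ hc.1
      have hind2 : (p.length : Int) ∈ j :: J ∧ PySem.List.slice s (some (i - (p.length : Int))) (some i) = p :=
        ⟨by rw [← hlen]; exact List.mem_cons_self .., by rw [← hlen]; exact hsp⟩
      rw [hIH, if_pos hm1, if_neg hm2, if_neg hind1, if_pos hind2, ← hlen]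
      ring
    · have hiff : (PySem.List.slice s (some (i - j)) (some i) ∈ (p :: L)) ↔
          (PySem.List.slice s (some (i - j)) (some i) ∈ L) := by
        simp only [List.mem_cons, hsp, false_or]
      have hCiff : ((p.length : Int) ∈ j :: J ∧ PySem.List.slice s (some (i - (p.length : Int))) (some i) = p) ↔
          ((p.length : Int) ∈ J ∧ PySem.List.slice s (some (i - (p.length : Int))) (some i) = p) := by
        constructor
        · rintro ⟨hm, hP⟩
          rcases List.mem_cons.mp hm with h | h
          · exact absurd (by rw [h] at hP; exact hP) hsp
          · exact ⟨h, hP⟩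
        · rintro ⟨hm, hP⟩
          exact ⟨List.mem_cons_of_mem _ hm, hP⟩
      rw [hIH, if_congr hiff rfl rfl, if_congr hCiff rfl rfl]
      ring

-- B's gather over a duplicate-free list of non-empty bounded patterns equals A's
-- gather over candidate lengths 1..min(i, ml).
theorem sum_gather (s : List Char) (i ml : Int) (dp : List Int)
    (_h1 : 1 ≤ i) (h2 : i ≤ (s.length : Int)) :
    ∀ L : List (List Char), L.Nodup → (∀ p ∈ L, p ≠ [] ∧ (p.length : Int) ≤ ml) →
    (L.map (fun p =>
        if (p.length : Int) ≤ i ∧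
            PySem.Chars.startswith (s.drop (i - (p.length : Int)).toNat) p = true then
          PySem.List.pyGetD dp (i - (p.length : Int)) 0
        else 0)).sum
    = ((PySem.List.pyRange 1 (1 + min i ml)).map
        (fun j => if PySem.List.slice s (some (i - j)) (some i) ∈ L then PySem.List.pyGetD dp (i - j) 0 else 0)).sum := by
  intro L
  induction L with
  | nil => simp
  | cons p L ih =>
    intro hnd hp
    have hhead := hp p (List.mem_cons_self ..)
    have hnodup := List.nodup_cons.mp hnd
    have hplen : 1 ≤ (p.length : Int) := by
      have := List.length_pos_iff.mpr hhead.1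
      omega
    rw [List.map_cons, List.sum_cons, ih hnodup.2 (fun q hq => hp q (List.mem_cons_of_mem _ hq)),
        sum_insert_head s i dp p L h2 hnodup.1 _ (nodup_pyRange_one ..)
          (fun j hj => by rw [PySem.List.mem_pyRange_one] at hj; omega)]
    by_cases hle : (p.length : Int) ≤ i
    · have hmem : (p.length : Int) ∈ PySem.List.pyRange 1 (1 + min i ml) := by
        rw [PySem.List.mem_pyRange_one]
        have := hhead.2
        omega
      have hiff : (PySem.Chars.startswith (s.drop (i - (p.length : Int)).toNat) p = true) ↔
          (PySem.List.slice s (some (i - (p.length : Int))) (some i) = p) := by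
        rw [PySem.Chars.startswith_iff, slice_take_drop s hplen hle h2, List.prefix_iff_eq_take,
            Int.toNat_natCast]
        exact eq_comm
      by_cases hsw : PySem.Chars.startswith (s.drop (i - (p.length : Int)).toNat) p = true
      · have hc1 : (p.length : Int) ≤ i ∧ PySem.Chars.startswith (s.drop (i - (p.length : Int)).toNat) p = true := ⟨hle, hsw⟩
        have hc2 : (p.length : Int) ∈ PySem.List.pyRange 1 (1 + min i ml) ∧ PySem.List.slice s (some (i - (p.length : Int))) (some i) = p := ⟨hmem, hiff.mp hsw⟩
        rw [if_pos hc1, if_pos hc2]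
        ring
      · have hc1 : ¬((p.length : Int) ≤ i ∧ PySem.Chars.startswith (s.drop (i - (p.length : Int)).toNat) p = true) := fun hc => hsw hc.2
        have hc2 : ¬((p.length : Int) ∈ PySem.List.pyRange 1 (1 + min i ml) ∧ PySem.List.slice s (some (i - (p.length : Int))) (some i) = p) := fun hc => hsw (hiff.mpr hc.2)
        rw [if_neg hc1, if_neg hc2]
        ring
    · have hnm : (p.length : Int) ∉ PySem.List.pyRange 1 (1 + min i ml) := by
        rw [PySem.List.mem_pyRange_one]
        omega
      have hc1 : ¬((p.length : Int) ≤ i ∧ PySem.Chars.startswith (s.drop (i - (p.length : Int)).toNat) p = true) := fun hc => hle hc.1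
      have hc2 : ¬((p.length : Int) ∈ PySem.List.pyRange 1 (1 + min i ml) ∧ PySem.List.slice s (some (i - (p.length : Int))) (some i) = p) := fun hc => hnm hc.1
      rw [if_neg hc1, if_neg hc2]
      ring

-- the per-design dp lists are equal
theorem aux_eq_dp (pl : List String) (design : String) :
    count_possible_ways_efficient_aux design pl
        (pl.foldl (fun m pattern => max m (PySem.Str.len pattern)) 0)
      = pv_dp (pv_pats pl) design.toList := by
  have hfm : pl.foldl (fun m pattern => max m (PySem.Str.len pattern)) 0
      = (pl.map PySem.Str.len).foldl max 0 := by
    rw [List.foldl_map]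
  have hmlub : ∀ t ∈ pl, PySem.Str.len t ≤ pl.foldl (fun m pattern => max m (PySem.Str.len pattern)) 0 := by
    intro t ht
    rw [hfm]
    exact (PySem.List.le_foldl_max _ _).2 _ (List.mem_map_of_mem ht)
  set ml := pl.foldl (fun m pattern => max m (PySem.Str.len pattern)) 0 with hmldef
  have hnodup : (pv_pats pl).Nodup := List.Nodup.filter _ (PySem.Set.nodup_ofList _)
  have hbound : ∀ p ∈ pv_pats pl, p ≠ [] ∧ (p.length : Int) ≤ ml := by
    intro p hp
    rw [pv_pats, List.mem_filter] at hp
    have hne : p ≠ [] := by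
      intro h
      rw [h] at hp
      simp at hp
    refine ⟨hne, ?_⟩
    have hmem : p ∈ pl.map String.toList := (PySem.Set.mem_ofList _ _).mp hp.1
    obtain ⟨t, ht, rfl⟩ := List.mem_map.mp hmem
    have := hmlub t ht
    rw [PySem.Str.len_eq] at this
    exact this
  simp only [count_possible_ways_efficient_aux, pv_dp]
  apply PySem.List.foldl_congr_mem
  intro acc i hi
  rw [PySem.List.mem_pyRange_one] at hi
  have h1 : 1 ≤ i := hi.1
  have h2 : i ≤ (design.toList.length : Int) := by omega
  congr 1
  have hx :
      (PySem.List.pyRange 1 (1 + min i ml)).foldl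
        (fun acc' j => if PySem.List.slice design.toList (some (i - j)) (some i) ∈ PySem.Set.ofList (pl.map String.toList) then acc' + PySem.List.pyGetD acc (i - j) 0 else acc') 0
      = ((PySem.List.pyRange 1 (1 + min i ml)).map
          (fun j => if PySem.List.slice design.toList (some (i - j)) (some i) ∈ pv_pats pl then PySem.List.pyGetD acc (i - j) 0 else 0)).sum := by
    rw [PySem.List.foldl_congr_mem _ _
        (fun acc' j => acc' + if PySem.List.slice design.toList (some (i - j)) (some i) ∈ PySem.Set.ofList (pl.map String.toList) then PySem.List.pyGetD acc (i - j) 0 else 0) 0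
        (fun acc' j _ => by
          by_cases hc : PySem.List.slice design.toList (some (i - j)) (some i) ∈ PySem.Set.ofList (pl.map String.toList) <;>
            simp [hc])]
    rw [PySem.List.foldl_add, zero_add]
    refine congrArg List.sum (List.map_congr_left ?_)
    intro j hj
    rw [PySem.List.mem_pyRange_one] at hj
    have hjl := slice_length design.toList hj.1 (by omega : j ≤ i) h2
    have hne : PySem.List.slice design.toList (some (i - j)) (some i) ≠ [] := by
      intro h
      rw [h] at hjl
      simp at hjl
      omega
    have hiff : (PySem.List.slice design.toList (some (i - j)) (some i) ∈ PySem.Set.ofList (pl.map String.toList)) ↔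
        (PySem.List.slice design.toList (some (i - j)) (some i) ∈ pv_pats pl) := by
      rw [pv_pats, List.mem_filter]
      simp [hne]
    exact if_congr hiff rfl rfl
  rw [hx, ← sum_gather design.toList i ml acc h1 h2 (pv_pats pl) hnodup hbound]

-- ===== VERDICT (by name: the statement is the Claim_ definition above) =====
theorem count_total_possible_ways_spec : Claim_equal_count_total_possible_ways := by
  intro designs patterns _hdom
  unfold Spec_count_total_possible_ways
  simp only [count_total_possible_ways, count_total_possible_ways_alt]
  exact PySem.List.foldl_congr_mem _ _ _ _ (fun acc d _ => by rw [aux_eq_dp])
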